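-- pv_equiv track=rewrite | github.com/process-intelligence-research/SFILES2 | Flowsheet_Class/nx_to_sfiles.py | sort_by_rank
-- ===== SOURCE A (Python) =====
-- def sort_by_rank(nodes_to_sort, ranks, visited=[]):
--     """
--     Method to sort the nodes by their ranks.
--     Second traversal: Depth first search implementation to traverse the directed graph from other than initial node
--     This stops when visiting a node from 1. traversal and all nodes of the branch are explored.
--     Parameters
--     ----------
--     nodes_to_sort: list
--     ranks: dict
--         node ranks calculated in calc_graph_invariant()
--     visited: list
--         list of already visited nodes
--     Returns
--     -------
--     nodes_sorted: list
--         contains certain neighbour nodes in sorted manner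
--
--     """
--     # first only
--     nodes_sorted_dict = {}
--     nodes_sorted_dict_cycle = {}
--     for n in nodes_to_sort:
--         if n in ranks:
--             if n in visited:
--                 nodes_sorted_dict_cycle[n] = ranks[n]
--             else:
--                 nodes_sorted_dict[n] = ranks[n]
--
--     # sorting
--     nodes_sorted_dict = dict(sorted(nodes_sorted_dict.items(), key=lambda item: item[1]))
--     nodes_sorted_dict_cycle = dict(sorted(nodes_sorted_dict_cycle.items(), key=lambda item: item[1]))
--
--     # concatenate -> direct cycle nodes are visited first
--     all_nodes_sorted = dict(nodes_sorted_dict_cycle, **nodes_sorted_dict)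
--     # only take the sorted keys as list
--     nodes_sorted = list(all_nodes_sorted.keys())
--
--     return nodes_sorted
-- ===== SOURCE B (Python) =====
-- def sort_by_rank(nodes_to_sort, ranks, visited=[]):
--     # one filtered dedup pass + one stable composite-key sort
--     seen = set()
--     uniq = []
--     for n in nodes_to_sort:
--         if n in ranks and n not in seen:
--             seen.add(n)
--             uniq.append(n)
--     return sorted(uniq, key=lambda n: (0 if n in visited else 1, ranks[n]))
-- ===== Notes on version B (the rewrite author's own statement) =====
-- stated objective: simpler
-- what changed: Replaces the two rank-keyed dicts, two separate sorts and the dict-merge/keys extraction by a single filtered first-occurrence dedup pass followed by one stable sort with the composite key (visited-flag, rank).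
import Mathlib
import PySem

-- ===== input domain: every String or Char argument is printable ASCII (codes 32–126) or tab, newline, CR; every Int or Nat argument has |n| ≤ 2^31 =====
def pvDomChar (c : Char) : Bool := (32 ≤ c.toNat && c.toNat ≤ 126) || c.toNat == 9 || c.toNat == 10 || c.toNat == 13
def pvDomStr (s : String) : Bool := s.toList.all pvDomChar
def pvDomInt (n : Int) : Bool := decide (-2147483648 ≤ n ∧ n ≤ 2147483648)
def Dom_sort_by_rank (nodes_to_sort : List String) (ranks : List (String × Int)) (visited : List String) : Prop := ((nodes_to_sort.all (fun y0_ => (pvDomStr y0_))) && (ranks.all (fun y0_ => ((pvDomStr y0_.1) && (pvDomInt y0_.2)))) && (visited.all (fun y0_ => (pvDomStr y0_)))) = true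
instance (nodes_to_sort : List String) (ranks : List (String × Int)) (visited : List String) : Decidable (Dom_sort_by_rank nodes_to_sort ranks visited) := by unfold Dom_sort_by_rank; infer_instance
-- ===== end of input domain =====

-- B replaces A's two rank-keyed dicts + two separate sorts + dict merge by one filtered
-- first-occurrence dedup pass and one stable sort on the composite key (visited-flag, rank);
-- objective: simpler (same result, proved below).

-- ===== PORT A =====
-- literal transliteration of A: one loop filling two dicts, each dict re-built sorted by
-- value, then dict(cycle, **normal) and list(keys)
def sort_by_rank (nodes_to_sort : List String) (ranks : List (String × Int)) (visited : List String) : List String :=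
  let rd := PySem.Dict.ofList ranks
  let p := nodes_to_sort.foldl
    (fun (st : PySem.Dict String Int × PySem.Dict String Int) n =>
      if rd.contains n then
        if visited.contains n then (st.1, st.2.insert n (rd.getD n 0))
        else (st.1.insert n (rd.getD n 0), st.2)
      else st)
    (PySem.Dict.empty, PySem.Dict.empty)
  let nodes_sorted_dict := PySem.Dict.ofList (PySem.List.sorted p.1.items (fun it => it.2))
  let nodes_sorted_dict_cycle := PySem.Dict.ofList (PySem.List.sorted p.2.items (fun it => it.2))
  -- dict(nodes_sorted_dict_cycle, **nodes_sorted_dict)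
  let all_nodes_sorted := nodes_sorted_dict.items.foldl (fun d q => d.insert q.1 q.2) nodes_sorted_dict_cycle
  all_nodes_sorted.keys

-- ===== PORT B =====
-- literal transliteration of Source B: filtered dedup pass, then one stable composite-key sort
def sort_by_rank_alt (nodes_to_sort : List String) (ranks : List (String × Int)) (visited : List String) : List String :=
  let rd := PySem.Dict.ofList ranks
  let st := nodes_to_sort.foldl
    (fun (st : PySem.Set String × List String) n =>
      if rd.contains n && !(PySem.Set.contains st.1 n) then (st.1.add n, st.2 ++ [n]) else st)
    (([] : PySem.Set String), [])
  PySem.List.sorted2 st.2 (fun n => if visited.contains n then (0 : Int) else 1) (fun n => rd.getD n 0)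

-- ===== PRECONDITION & SPEC =====
def Spec_sort_by_rank (nodes_to_sort : List String) (ranks : List (String × Int)) (visited : List String) (out : List String) : Prop := out = sort_by_rank_alt nodes_to_sort ranks visited
instance (nodes_to_sort : List String) (ranks : List (String × Int)) (visited : List String) (out : List String) : Decidable (Spec_sort_by_rank nodes_to_sort ranks visited out) := by unfold Spec_sort_by_rank; infer_instance

-- ===== CLAIM (what is proved, stated in full; the proofs are below) =====
def Claim_equal_sort_by_rank : Prop := ∀ (nodes_to_sort : List String) (ranks : List (String × Int)) (visited : List String), Dom_sort_by_rank nodes_to_sort ranks visited → Spec_sort_by_rank nodes_to_sort ranks visited (sort_by_rank nodes_to_sort ranks visited)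

-- ===== LEMMAS AND PROOFS =====

-- the composite "before" predicate of sorted2 and the plain one of sorted
def pvLtc {α : Type} (k1 k2 : α → Int) (a b : α) : Bool :=
  decide (k1 a < k1 b) || (!decide (k1 b < k1 a) && decide (k2 a < k2 b))
def pvLt2 {α : Type} (k2 : α → Int) (a b : α) : Bool := decide (k2 a < k2 b)

lemma sorted2_eq_foldl {α : Type} (xs : List α) (k1 k2 : α → Int) :
    PySem.List.sorted2 xs k1 k2 = xs.foldl (fun acc x => PySem.List.insertBy (pvLtc k1 k2) x acc) [] := rfl

lemma insertBy_congr {α : Type} (b1 b2 : α → α → Bool) (x : α) (l : List α)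
    (h : ∀ y ∈ l, b1 x y = b2 x y) :
    PySem.List.insertBy b1 x l = PySem.List.insertBy b2 x l := by
  induction l with
  | nil => rfl
  | cons a l ih =>
      simp only [PySem.List.insertBy, h a (by simp)]
      rcases hb : b2 x a with _ | _
      · simp [ih (fun y hy => h y (by simp [hy]))]
      · simp

lemma insert_split_zero {α : Type} (k1 k2 : α → Int) (x : α) (A B : List α)
    (hx : k1 x = 0) (hA : ∀ a ∈ A, k1 a = 0) (hB : ∀ b ∈ B, k1 b = 1) :
    PySem.List.insertBy (pvLtc k1 k2) x (A ++ B) = PySem.List.insertBy (pvLt2 k2) x A ++ B := by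
  induction A with
  | nil =>
      cases B with
      | nil => rfl
      | cons b B' =>
          have : pvLtc k1 k2 x b = true := by
            simp [pvLtc, hx, hB b (by simp)]
          simp [PySem.List.insertBy, this]
  | cons a A' ih =>
      have ha : k1 a = 0 := hA a (by simp)
      have hlt : pvLtc k1 k2 x a = pvLt2 k2 x a := by
        simp [pvLtc, pvLt2, hx, ha]
      simp only [List.cons_append, PySem.List.insertBy, hlt]
      rcases hb : pvLt2 k2 x a with _ | _
      · simp [ih (fun y hy => hA y (by simp [hy]))]
      · simp

lemma insert_split_one {α : Type} (k1 k2 : α → Int) (x : α) (A B : List α)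
    (hx : k1 x = 1) (hA : ∀ a ∈ A, k1 a = 0) (hB : ∀ b ∈ B, k1 b = 1) :
    PySem.List.insertBy (pvLtc k1 k2) x (A ++ B) = A ++ PySem.List.insertBy (pvLt2 k2) x B := by
  induction A with
  | nil =>
      simp only [List.nil_append]
      exact insertBy_congr _ _ x B (fun y hy => by
        simp [pvLtc, pvLt2, hx, hB y hy])
  | cons a A' ih =>
      have ha : k1 a = 0 := hA a (by simp)
      have hlt : pvLtc k1 k2 x a = false := by
        simp [pvLtc, hx, ha]
      simp only [List.cons_append, PySem.List.insertBy, hlt]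
      simp [ih (fun y hy => hA y (by simp [hy]))]

lemma foldl_split {α : Type} (k1 k2 : α → Int) (xs : List α) :
    ∀ (A B : List α), (∀ a ∈ A, k1 a = 0) → (∀ b ∈ B, k1 b = 1) →
    (∀ x ∈ xs, k1 x = 0 ∨ k1 x = 1) →
    xs.foldl (fun acc x => PySem.List.insertBy (pvLtc k1 k2) x acc) (A ++ B)
      = (xs.filter (fun x => k1 x == 0)).foldl (fun acc x => PySem.List.insertBy (pvLt2 k2) x acc) A
        ++ (xs.filter (fun x => k1 x == 1)).foldl (fun acc x => PySem.List.insertBy (pvLt2 k2) x acc) B := by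
  induction xs with
  | nil => intro A B _ _ _; simp
  | cons x xs ih =>
      intro A B hA hB hxs
      rcases hxs x (by simp) with hx | hx
      · have h0 : (k1 x == 0) = true := by simp [hx]
        have h1 : (k1 x == 1) = false := by simp [hx]
        simp only [List.foldl_cons, List.filter_cons, h0, h1, if_pos, Bool.false_eq_true, if_neg,
          not_false_eq_true]
        rw [insert_split_zero k1 k2 x A B hx hA hB]
        have hA' : ∀ a ∈ PySem.List.insertBy (pvLt2 k2) x A, k1 a = 0 := by
          intro a haa
          rcases (PySem.List.mem_insertBy _ _ _ _).1 haa with rfl | haa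
          · exact hx
          · exact hA a haa
        simpa using ih (PySem.List.insertBy (pvLt2 k2) x A) B hA' hB
          (fun y hy => hxs y (by simp [hy]))
      · have h1 : (k1 x == 1) = true := by simp [hx]
        have h0 : (k1 x == 0) = false := by simp [hx]
        simp only [List.foldl_cons, List.filter_cons, h0, h1, if_pos, Bool.false_eq_true, if_neg,
          not_false_eq_true]
        rw [insert_split_one k1 k2 x A B hx hA hB]
        have hB' : ∀ b ∈ PySem.List.insertBy (pvLt2 k2) x B, k1 b = 1 := by
          intro b hbb
          rcases (PySem.List.mem_insertBy _ _ _ _).1 hbb with rfl | hbb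
          · exact hx
          · exact hB b hbb
        simpa using ih A (PySem.List.insertBy (pvLt2 k2) x B) hA hB'
          (fun y hy => hxs y (by simp [hy]))

-- sorted2 with a 0/1 first key is the concatenation of two plain stable sorts
lemma sorted2_split {α : Type} (xs : List α) (k1 k2 : α → Int)
    (h : ∀ x ∈ xs, k1 x = 0 ∨ k1 x = 1) :
    PySem.List.sorted2 xs k1 k2
      = PySem.List.sorted (xs.filter (fun x => k1 x == 0)) k2
        ++ PySem.List.sorted (xs.filter (fun x => k1 x == 1)) k2 := by
  rw [sorted2_eq_foldl, PySem.List.sorted_eq_foldl_insertBy, PySem.List.sorted_eq_foldl_insertBy]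
  simpa [pvLt2] using foldl_split k1 k2 xs [] [] (by simp) (by simp) h

-- map through insertion sort
lemma insertBy_map {α β : Type} (before : β → β → Bool) (f : α → β) (x : α) (l : List α) :
    PySem.List.insertBy before (f x) (l.map f)
      = (PySem.List.insertBy (fun a b => before (f a) (f b)) x l).map f := by
  induction l with
  | nil => rfl
  | cons a l ih =>
      simp only [List.map_cons, PySem.List.insertBy]
      split_ifs with hb
      · simp
      · simp [ih]

lemma sorted_map {α β : Type} (f : α → β) (key : β → Int) (l : List α) :
    PySem.List.sorted (l.map f) key = (PySem.List.sorted l (fun a => key (f a))).map f := by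
  rw [PySem.List.sorted_eq_foldl_insertBy, PySem.List.sorted_eq_foldl_insertBy]
  suffices h : ∀ (acc : List α),
      (l.map f).foldl (fun acc x => PySem.List.insertBy (fun a b => decide (key a < key b)) x acc) (acc.map f)
        = (l.foldl (fun acc x => PySem.List.insertBy (fun a b => decide (key (f a) < key (f b))) x acc) acc).map f by
    simpa using h []
  induction l with
  | nil => intro acc; simp
  | cons a l ih =>
      intro acc
      simp only [List.map_cons, List.foldl_cons]
      rw [insertBy_map, ih]

-- dedup commutes with filter
lemma ofList_filter {α : Type} [BEq α] [LawfulBEq α] (p : α → Bool) (l : List α) :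
    PySem.Set.ofList (l.filter p) = (PySem.Set.ofList l).filter p := by
  induction l using List.reverseRecOn with
  | nil => rfl
  | append_singleton l x ih =>
      rw [List.filter_append, PySem.Set.ofList_append_singleton, PySem.Set.add_eq_ite]
      rcases hp : p x with _ | _
      · have hfx : List.filter p [x] = [] := by simp [hp]
        rw [hfx, List.append_nil]
        split_ifs with hm
        · exact ih
        · simp [List.filter_append, hp, ih]
      · have hfx : List.filter p [x] = [x] := by simp [hp]
        rw [hfx, PySem.Set.ofList_append_singleton, PySem.Set.add_eq_ite, ih]
        have hmem_iff : x ∈ (PySem.Set.ofList l).filter p ↔ x ∈ PySem.Set.ofList l := by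
          simp [List.mem_filter, hp]
        split_ifs with h1 h2 h2
        · rfl
        · exact absurd (hmem_iff.1 h1) h2
        · exact absurd (hmem_iff.2 h2) h1
        · simp [List.filter_append, hp]

-- ----- characterisation of A's two-dict loop -----

lemma pair_fold_split (rd : PySem.Dict String Int) (visited : List String) (l : List String) :
    ∀ (d0 d1 : PySem.Dict String Int),
    l.foldl (fun (st : PySem.Dict String Int × PySem.Dict String Int) n =>
      if rd.contains n then
        if visited.contains n then (st.1, st.2.insert n (rd.getD n 0))
        else (st.1.insert n (rd.getD n 0), st.2)
      else st) (d0, d1)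
    = ((l.filter (fun n => rd.contains n && !visited.contains n)).foldl
        (fun d n => d.insert n (rd.getD n 0)) d0,
       (l.filter (fun n => rd.contains n && visited.contains n)).foldl
        (fun d n => d.insert n (rd.getD n 0)) d1) := by
  induction l with
  | nil => intro d0 d1; simp
  | cons n l ih =>
      intro d0 d1
      rw [List.foldl_cons, List.filter_cons, List.filter_cons]
      rcases hr : rd.contains n with _ | _
      · simpa using ih d0 d1
      · rcases hv : visited.contains n with _ | _
        · simpa using ih (d0.insert n (rd.getD n 0)) d1
        · simpa using ih d0 (d1.insert n (rd.getD n 0))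

lemma getD_insert_fold (rd : PySem.Dict String Int) (l : List String) :
    ∀ (d : PySem.Dict String Int) (k : String),
    (l.foldl (fun d n => d.insert n (rd.getD n 0)) d).getD k 0
      = if k ∈ l then rd.getD k 0 else d.getD k 0 := by
  induction l with
  | nil => intro d k; simp
  | cons n l ih =>
      intro d k
      rw [List.foldl_cons, ih]
      by_cases hl : k ∈ l
      · simp [hl]
      · by_cases hk : k = n
        · subst hk; simp [hl, PySem.Dict.getD_insert_self]
        · simp [hl, hk, PySem.Dict.getD_insert]

lemma items_insert_fold (rd : PySem.Dict String Int) (l : List String) :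
    (l.foldl (fun d n => d.insert n (rd.getD n 0)) PySem.Dict.empty).items
      = (PySem.Set.ofList l).map (fun n => (n, rd.getD n 0)) := by
  have hkeys : (l.foldl (fun d n => d.insert n (rd.getD n 0)) PySem.Dict.empty).keys
      = PySem.Set.ofList l := by
    rw [PySem.Dict.keys_foldl_insert l (fun _ n => rd.getD n 0) PySem.Dict.empty]
    simp [PySem.Set.update_nil_left]
  have hnd : (l.foldl (fun d n => d.insert n (rd.getD n 0)) PySem.Dict.empty).keys.Nodup := by
    rw [hkeys]; exact PySem.Set.nodup_ofList l
  rw [PySem.Dict.items_eq_map_keys _ hnd 0, hkeys]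
  refine List.map_congr_left ?_
  intro k hk
  have hkl : k ∈ l := (PySem.Set.mem_ofList l k).1 hk
  rw [getD_insert_fold]
  simp [hkl]

lemma b_fold_eq (rd : PySem.Dict String Int) (l : List String) :
    l.foldl (fun (st : PySem.Set String × List String) n =>
        if rd.contains n && !(PySem.Set.contains st.1 n) then (st.1.add n, st.2 ++ [n]) else st)
      (([] : PySem.Set String), [])
    = (PySem.Set.ofList (l.filter (fun n => rd.contains n)),
       PySem.Set.ofList (l.filter (fun n => rd.contains n))) := by
  induction l using List.reverseRecOn with
  | nil => rfl
  | append_singleton l x ih =>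
      rw [List.foldl_append, ih]
      rcases hc : (PySem.Set.ofList (l.filter (fun n => rd.contains n))).contains x with _ | _
      · have hnot : x ∉ PySem.Set.ofList (l.filter (fun n => rd.contains n)) := by
          intro hmem
          have hcc := (PySem.Set.contains_iff _ _).2 hmem
          rw [hc] at hcc
          exact Bool.noConfusion hcc
        rcases hr : rd.contains x with _ | _
        · simp [List.filter_append, hr]
        · have hfx : List.filter (fun n => rd.contains n) [x] = [x] := by simp [hr]
          have hT : PySem.Set.ofList (l.filter (fun n => rd.contains n) ++ [x])
              = PySem.Set.ofList (l.filter (fun n => rd.contains n)) ++ [x] := by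
            rw [PySem.Set.ofList_append_singleton, PySem.Set.add_eq_ite, if_neg hnot]
          have hadd : (PySem.Set.ofList (l.filter (fun n => rd.contains n))).add x
              = PySem.Set.ofList (l.filter (fun n => rd.contains n)) ++ [x] := by
            rw [PySem.Set.add_eq_ite, if_neg hnot]
          simp [List.foldl_cons, List.filter_append, hfx, hr, hnot, hT]
      · have hmem : x ∈ PySem.Set.ofList (l.filter (fun n => rd.contains n)) :=
          (PySem.Set.contains_iff _ _).1 hc
        have hin : x ∈ l.filter (fun n => rd.contains n) := (PySem.Set.mem_ofList _ _).1 hmem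
        have hr : rd.contains x = true := (List.mem_filter.1 hin).2
        have hfx : List.filter (fun n => rd.contains n) [x] = [x] := by simp [hr]
        have hT : PySem.Set.ofList (l.filter (fun n => rd.contains n) ++ [x])
            = PySem.Set.ofList (l.filter (fun n => rd.contains n)) := by
          rw [PySem.Set.ofList_append_singleton, PySem.Set.add_eq_ite, if_pos hmem]
        simp [List.foldl_cons, List.filter_append, hfx, hmem, hT]

theorem sort_by_rank_eq (nodes_to_sort : List String) (ranks : List (String × Int)) (visited : List String) :
    sort_by_rank nodes_to_sort ranks visited = sort_by_rank_alt nodes_to_sort ranks visited := by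
  classical
  set rd := PySem.Dict.ofList ranks with hrd
  set v : String → Int := fun n => rd.getD n 0 with hv
  -- ---------- A side ----------
  set pN : String → Bool := fun n => rd.contains n && !visited.contains n with hpN
  set pC : String → Bool := fun n => rd.contains n && visited.contains n with hpC
  set Nl : List String := PySem.Set.ofList (nodes_to_sort.filter pN) with hNl
  set Cl : List String := PySem.Set.ofList (nodes_to_sort.filter pC) with hCl
  have hNnd : Nl.Nodup := PySem.Set.nodup_ofList _
  have hCnd : Cl.Nodup := PySem.Set.nodup_ofList _
  set sN : List String := PySem.List.sorted Nl v with hsN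
  set sC : List String := PySem.List.sorted Cl v with hsC
  have hsNnd : sN.Nodup := ((PySem.List.sorted_perm Nl v false).nodup_iff).2 hNnd
  have hsCnd : sC.Nodup := ((PySem.List.sorted_perm Cl v false).nodup_iff).2 hCnd
  have hsNmem : ∀ x ∈ sN, x ∈ nodes_to_sort.filter pN := by
    intro x hx
    exact (PySem.Set.mem_ofList _ _).1 ((PySem.List.mem_sorted _ _ _ _).1 hx)
  have hsCmem : ∀ x ∈ sC, x ∈ nodes_to_sort.filter pC := by
    intro x hx
    exact (PySem.Set.mem_ofList _ _).1 ((PySem.List.mem_sorted _ _ _ _).1 hx)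
  have hA : sort_by_rank nodes_to_sort ranks visited = sC ++ sN := by
    simp only [sort_by_rank]
    rw [← hrd]
    rw [pair_fold_split rd visited nodes_to_sort PySem.Dict.empty PySem.Dict.empty]
    simp only [← hpN, ← hpC]
    rw [items_insert_fold rd (nodes_to_sort.filter pN), items_insert_fold rd (nodes_to_sort.filter pC)]
    rw [← hNl, ← hCl]
    rw [sorted_map (fun n => (n, v n)) (fun it => it.2) Nl,
        sorted_map (fun n => (n, v n)) (fun it => it.2) Cl]
    rw [← hsN, ← hsC]
    -- the two sorted dicts have exactly the sorted items lists
    have hfresh : ∀ (s : List String), s.Nodup →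
        (PySem.Dict.ofList (s.map (fun n => (n, v n)))).items = s.map (fun n => (n, v n)) := by
      intro s hs
      show ((s.map (fun n => (n, v n))).foldl (fun acc p => acc.insert p.1 p.2) PySem.Dict.empty).items = _
      rw [PySem.Dict.items_foldl_insert_fresh (s.map (fun n => (n, v n))) Prod.fst Prod.snd
            PySem.Dict.empty (by intro a _; simp) (by simpa [List.map_map, Function.comp_def] using hs)]
      simp [PySem.Dict.empty, Function.comp_def]
    have hdn : (PySem.Dict.ofList (sN.map (fun n => (n, v n)))).items = sN.map (fun n => (n, v n)) :=
      hfresh sN hsNnd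
    have hdc : (PySem.Dict.ofList (sC.map (fun n => (n, v n)))).items = sC.map (fun n => (n, v n)) :=
      hfresh sC hsCnd
    -- the merge appends: dn's keys are fresh for dc
    have hdckeys : (PySem.Dict.ofList (sC.map (fun n => (n, v n)))).keys = sC := by
      simp only [PySem.Dict.keys]
      rw [hdc]; simp [List.map_map, Function.comp_def]
    have hdisj : ∀ q ∈ (PySem.Dict.ofList (sN.map (fun n => (n, v n)))).items,
        (PySem.Dict.ofList (sC.map (fun n => (n, v n)))).contains q.1 = false := by
      intro q hq
      rw [hdn] at hq
      rcases List.mem_map.1 hq with ⟨n, hn, rfl⟩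
      have hnN := hsNmem n hn
      have hnot : n ∉ sC := by
        intro hc
        have := hsCmem n hc
        have h1 := (List.mem_filter.1 hnN).2
        have h2 := (List.mem_filter.1 this).2
        simp [hpN] at h1
        simp [hpC] at h2
        exact absurd h2.2 (by simpa using h1.2)
      rcases hcon : (PySem.Dict.ofList (sC.map (fun n => (n, v n)))).contains n with _ | _
      · rfl
      · exact absurd (by
          have := (PySem.Dict.contains_iff_mem_keys _ _).1 hcon
          rwa [hdckeys] at this) hnot
    have hmerge : ((PySem.Dict.ofList (sN.map (fun n => (n, v n)))).items.foldl
        (fun d q => d.insert q.1 q.2) (PySem.Dict.ofList (sC.map (fun n => (n, v n))))).items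
        = sC.map (fun n => (n, v n)) ++ sN.map (fun n => (n, v n)) := by
      rw [PySem.Dict.items_foldl_insert_fresh _ Prod.fst Prod.snd _ hdisj
            (by rw [hdn]; simpa [List.map_map, Function.comp_def] using hsNnd)]
      rw [hdc, hdn]
      simp
    simp only [PySem.Dict.keys]
    rw [hmerge]
    simp [List.map_map, Function.comp_def]
  -- ---------- B side ----------
  set k1 : String → Int := fun n => if visited.contains n then (0 : Int) else 1 with hk1
  set U : List String := PySem.Set.ofList (nodes_to_sort.filter (fun n => rd.contains n)) with hU
  have hB : sort_by_rank_alt nodes_to_sort ranks visited = PySem.List.sorted2 U k1 v := by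
    simp only [sort_by_rank_alt]
    rw [← hrd, b_fold_eq rd nodes_to_sort, ← hU]
  -- split the composite sort
  have h01 : ∀ x ∈ U, k1 x = 0 ∨ k1 x = 1 := by
    intro x _
    by_cases hvx : x ∈ visited
    · left; simp [hk1, hvx]
    · right; simp [hk1, hvx]
  have hsplit := sorted2_split U k1 v h01
  -- identify the two filtered halves with Cl and Nl
  have hf0 : U.filter (fun x => k1 x == 0) = Cl := by
    have : U.filter (fun x => k1 x == 0) = U.filter (fun x => visited.contains x) := by
      refine List.filter_congr ?_
      intro x _
      by_cases hvx : x ∈ visited <;> simp [hk1, hvx]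
    rw [this, hU, hCl, ← ofList_filter]
    congr 1
    rw [List.filter_filter]
    refine List.filter_congr ?_
    intro x _
    simp [hpC, Bool.and_comm]
  have hf1 : U.filter (fun x => k1 x == 1) = Nl := by
    have : U.filter (fun x => k1 x == 1) = U.filter (fun x => !visited.contains x) := by
      refine List.filter_congr ?_
      intro x _
      by_cases hvx : x ∈ visited <;> simp [hk1, hvx]
    rw [this, hU, hNl, ← ofList_filter]
    congr 1
    rw [List.filter_filter]
    refine List.filter_congr ?_
    intro x _
    simp [hpN, Bool.and_comm]
  rw [hA, hB, hsplit, hf0, hf1, ← hsC, ← hsN]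

-- ===== VERDICT (by name: the statement is the Claim_ definition above) =====
theorem sort_by_rank_spec : Claim_equal_sort_by_rank := by
  intro nodes_to_sort ranks visited _
  show sort_by_rank nodes_to_sort ranks visited = sort_by_rank_alt nodes_to_sort ranks visited
  exact sort_by_rank_eq nodes_to_sort ranks visited
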